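-- pv_equiv track=rewrite | github.com/andr1976/thermo | thermo/unifac.py | chemgroups_to_matrix
-- ===== SOURCE A (Python) =====
-- def chemgroups_to_matrix(chemgroups):
--     r'''
--     Index by [group index][compound index]
--
--     >>> chemgroups_to_matrix([{9: 6}, {2: 6}, {1: 1, 18: 1}, {1: 1, 2: 1, 14: 1}])
--     [[0, 0, 1, 1], [0, 6, 0, 1], [6, 0, 0, 0], [0, 0, 0, 1], [0, 0, 1, 0]]
--     '''
--     matrix = []
--     keys = []
--     all_keys = set()
--     [all_keys.update(i.keys()) for i in chemgroups]
--     for k in sorted(list(all_keys)):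
--         matrix.append([l[k] if k in l else 0 for l in chemgroups])
--     return matrix
-- ===== SOURCE B (Python) =====
-- def chemgroups_to_matrix(chemgroups):
--     all_keys = set()
--     for d in chemgroups:
--         all_keys.update(d)
--     keys = sorted(all_keys)
--     if not keys:
--         return []
--     cols = [[d.get(k, 0) for k in keys] for d in chemgroups]
--     return [list(row) for row in zip(*cols)]
-- ===== Notes on version B (the rewrite author's own statement) =====
-- stated objective: alternative
-- what changed: B builds one dense column per compound in a single pass using dict.get and then transposes with zip(*cols), instead of A's per-key loop that scans every compound with a membership test for each sorted key.
import Mathlib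
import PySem

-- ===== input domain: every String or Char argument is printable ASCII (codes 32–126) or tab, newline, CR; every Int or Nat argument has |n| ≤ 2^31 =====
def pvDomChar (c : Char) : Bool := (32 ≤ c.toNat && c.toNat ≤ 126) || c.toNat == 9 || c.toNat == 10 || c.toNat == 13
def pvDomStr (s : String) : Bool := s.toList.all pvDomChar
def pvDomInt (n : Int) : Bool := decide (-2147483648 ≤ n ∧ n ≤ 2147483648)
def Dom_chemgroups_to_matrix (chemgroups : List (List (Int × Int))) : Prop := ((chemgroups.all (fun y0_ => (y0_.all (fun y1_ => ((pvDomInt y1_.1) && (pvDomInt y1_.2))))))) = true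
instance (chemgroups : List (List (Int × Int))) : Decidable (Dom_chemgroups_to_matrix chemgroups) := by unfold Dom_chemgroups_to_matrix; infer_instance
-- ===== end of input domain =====

-- B builds one dense column per compound and transposes (zip(*cols)), instead of A's per-sorted-key scan of all compounds; alternative decomposition, same cost.


-- ===== PORT A =====
-- matrix = []; all_keys = set(); all_keys.update(i.keys()) for each i; for k in sorted(all_keys): matrix.append([l[k] if k in l else 0 for l in chemgroups])
def chemgroups_to_matrix (chemgroups : List (List (Int × Int))) : List (List Int) :=
  let all_keys : PySem.Set Int :=
    chemgroups.foldl (fun s l => PySem.Set.update s (PySem.Dict.mk l).keys) PySem.Set.empty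
  (PySem.List.sorted all_keys (fun x => x) false).foldl
    (fun matrix k =>
      matrix ++ [chemgroups.map (fun l =>
        if (PySem.Dict.mk l).contains k then PySem.Dict.getD (PySem.Dict.mk l) k 0 else 0)])
    []

-- ===== PORT B =====
-- zip(*cols): pvHeads splits every list into head/tail (none as soon as one is empty);
-- pvZipStarAux recurses structurally on the FIRST column, stopping when any column is exhausted — exact zip semantics.
def pvHeads (cols : List (List Int)) : Option (List Int × List (List Int)) :=
  cols.foldr
    (fun c acc =>
      match c, acc with
      | x :: t, some (hs, ts) => some (x :: hs, t :: ts)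
      | _, _ => none)
    (some ([], []))

def pvZipStarAux : List Int → List (List Int) → List (List Int)
  | [], _ => []
  | x :: t, rest =>
    match pvHeads rest with
    | none => []
    | some (hs, ts) => (x :: hs) :: pvZipStarAux t ts

def pvZipStar (cols : List (List Int)) : List (List Int) :=
  match cols with
  | [] => []
  | c :: rest => pvZipStarAux c rest

def chemgroups_to_matrix_alt (chemgroups : List (List (Int × Int))) : List (List Int) :=
  let all_keys : PySem.Set Int :=
    chemgroups.foldl (fun s d => PySem.Set.update s (PySem.Dict.mk d).keys) PySem.Set.empty
  let keys := PySem.List.sorted all_keys (fun x => x) false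
  if keys = [] then []
  else
    pvZipStar (chemgroups.map (fun d => keys.map (fun k => PySem.Dict.getD (PySem.Dict.mk d) k 0)))

-- ===== PRECONDITION & SPEC =====
def Spec_chemgroups_to_matrix (chemgroups : List (List (Int × Int))) (out : List (List Int)) : Prop := out = chemgroups_to_matrix_alt chemgroups
instance (chemgroups : List (List (Int × Int))) (out : List (List Int)) : Decidable (Spec_chemgroups_to_matrix chemgroups out) := by unfold Spec_chemgroups_to_matrix; infer_instance

-- ===== CLAIM (what is proved, stated in full; the proofs are below) =====
def Claim_equal_chemgroups_to_matrix : Prop := ∀ (chemgroups : List (List (Int × Int))), Dom_chemgroups_to_matrix chemgroups → Spec_chemgroups_to_matrix chemgroups (chemgroups_to_matrix chemgroups)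

-- ===== LEMMAS AND PROOFS =====

-- heads/tails of a list of identically-shaped (nonempty) mapped columns
theorem pvHeads_map_cons {α : Type} (ds : List α) (f : α → Int) (g : α → List Int) :
    pvHeads (ds.map (fun d => f d :: g d)) = some (ds.map f, ds.map g) := by
  induction ds with
  | nil => rfl
  | cons d ds ih => simp only [pvHeads, List.map_cons, List.foldr_cons] at ih ⊢; rw [ih]

-- zip(*·) of a rectangular list-of-mapped-columns is the transposed map-of-maps
theorem pvZipStarAux_map {α : Type} (g : α → Int → Int) (d0 : α) (ds : List α) :
    ∀ ks : List Int,
      pvZipStarAux (ks.map (g d0)) (ds.map (fun d => ks.map (g d))) =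
        ks.map (fun k => g d0 k :: ds.map (fun d => g d k)) := by
  intro ks
  induction ks with
  | nil => simp [pvZipStarAux]
  | cons k kt ih =>
    have h := pvHeads_map_cons ds (fun d => g d k) (fun d => kt.map (g d))
    simp only [List.map_cons, pvZipStarAux, h]
    rw [ih]

theorem chemgroups_to_matrix_eq (chemgroups : List (List (Int × Int))) :
    chemgroups_to_matrix chemgroups = chemgroups_to_matrix_alt chemgroups := by
  -- A's cell 'l[k] if k in l else 0' is exactly dict.get(k, 0)
  have hcell : ∀ (l : List (Int × Int)) (k : Int),
      (if (PySem.Dict.mk l).contains k then PySem.Dict.getD (PySem.Dict.mk l) k 0 else 0)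
        = PySem.Dict.getD (PySem.Dict.mk l) k 0 := by
    intro l k
    by_cases h : (PySem.Dict.mk l).contains k
    · rw [if_pos h]
    · rw [if_neg h, PySem.Dict.getD_of_not_contains _ _ (by simp only [Bool.not_eq_true] at h; exact h)]
  simp only [chemgroups_to_matrix, chemgroups_to_matrix_alt]
  rw [PySem.List.foldl_append_singleton_eq_map]
  simp only [hcell]
  cases chemgroups with
  | nil => rfl
  | cons d0 ds =>
    set keys := PySem.List.sorted
        ((d0 :: ds).foldl (fun s l => PySem.Set.update s (PySem.Dict.mk l).keys) PySem.Set.empty)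
        (fun x => x) false with hk
    by_cases hke : keys = []
    · rw [hke]
      rfl
    · rw [if_neg hke]
      simp only [List.map_cons, pvZipStar]
      rw [pvZipStarAux_map (fun d k => PySem.Dict.getD (PySem.Dict.mk d) k 0) d0 ds keys,
        List.nil_append]

-- ===== VERDICT (by name: the statement is the Claim_ definition above) =====
theorem chemgroups_to_matrix_spec : Claim_equal_chemgroups_to_matrix := by
  intro chemgroups _
  unfold Spec_chemgroups_to_matrix
  exact chemgroups_to_matrix_eq chemgroups
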